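-- pv_equiv track=rewrite | github.com/tass25/planning | backend/benchmark/regression_runner.py | _partition_sas_blocks
-- ===== SOURCE A (Python) =====
-- def _partition_sas_blocks(sas_code: str) -> list[str]:
--     """Naively split SAS code into DATA/PROC blocks for individual testing."""
--     blocks: list[str] = []
--     current: list[str] = []
--     for line in sas_code.splitlines(keepends=True):
--         current.append(line)
--         stripped = line.strip().lower()
--         if stripped == "run;" or stripped == "quit;":
--             block = "".join(current).strip()
--             if block:
--                 blocks.append(block)
--             current = []
--     if current:
--         remaining = "".join(current).strip()
--         if remaining:
--             blocks.append(remaining)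
--     return blocks or [sas_code]
-- ===== SOURCE B (Python) =====
-- def _chunks(lines):
--     if not lines:
--         return []
--     head, rest = lines[0], lines[1:]
--     stripped = head.strip().lower()
--     if stripped == "run;" or stripped == "quit;":
--         return [head] + _chunks(rest)
--     tail = _chunks(rest)
--     return [head + tail[0]] + tail[1:] if tail else [head]
--
--
-- def _partition_sas_blocks(sas_code: str) -> list[str]:
--     """Recursively split SAS code into DATA/PROC blocks (split after run;/quit; lines)."""
--     blocks = [b for b in (c.strip() for c in _chunks(sas_code.splitlines(keepends=True))) if b]
--     return blocks or [sas_code]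
-- ===== Notes on version B (the rewrite author's own statement) =====
-- stated objective: alternative
-- what changed: Replaced A's iterative state machine (blocks/current accumulators mutated per line) by a structural recursion that builds the chunk list back-to-front, prepending each non-terminator line to the first chunk of the recursive result, followed by one map-strip-filter pass.
import Mathlib
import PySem

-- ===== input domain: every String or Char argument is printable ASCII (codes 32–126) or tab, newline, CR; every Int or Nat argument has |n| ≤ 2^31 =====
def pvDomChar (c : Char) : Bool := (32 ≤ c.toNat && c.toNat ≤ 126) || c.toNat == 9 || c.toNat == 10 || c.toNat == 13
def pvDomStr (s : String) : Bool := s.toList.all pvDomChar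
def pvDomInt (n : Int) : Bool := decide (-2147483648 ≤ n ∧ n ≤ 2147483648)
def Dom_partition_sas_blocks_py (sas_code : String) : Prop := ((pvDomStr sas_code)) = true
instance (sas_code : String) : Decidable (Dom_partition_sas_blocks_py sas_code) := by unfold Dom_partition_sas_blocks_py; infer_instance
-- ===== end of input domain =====

-- B differs from A by decomposition only: a structural recursion building chunks back-to-front
-- instead of A's iterative blocks/current accumulator loop; same return value everywhere.

-- shared primitive: Python's str.splitlines(keepends=True), hand-ported (PySem.Chars.splitlines drops ends).
-- Exact on the Dom_ ASCII domain, where the only line breaks are '\n', '\r' and '\r\n'.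
def pvSplitlinesKeep : List Char → List (List Char)
  | [] => []
  | '\r' :: '\n' :: rest => ['\r', '\n'] :: pvSplitlinesKeep rest
  | c :: rest =>
    if c = '\n' || c = '\r' then [c] :: pvSplitlinesKeep rest
    else match pvSplitlinesKeep rest with
      | [] => [[c]]
      | l :: ls => (c :: l) :: ls

-- ===== PORT A =====
-- A's loop: state (blocks, current); on each line append to current, and on a run;/quit; line
-- flush "".join(current).strip() (if non-empty) into blocks.
def pvLoopA : List (List Char) → List (List Char) → List (List Char) → List (List Char)
  | [], blocks, cur =>
      if cur.isEmpty then blocks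
      else
        let remaining := PySem.Chars.strip cur.flatten
        if remaining.isEmpty then blocks else blocks ++ [remaining]
  | line :: rest, blocks, cur =>
      let cur' := cur ++ [line]
      let stripped := PySem.Chars.lower (PySem.Chars.strip line)
      if stripped = "run;".toList ∨ stripped = "quit;".toList then
        let block := PySem.Chars.strip cur'.flatten
        pvLoopA rest (if block.isEmpty then blocks else blocks ++ [block]) []
      else
        pvLoopA rest blocks cur'

def partition_sas_blocks_py (sas_code : String) : List String :=
  let blocks := pvLoopA (pvSplitlinesKeep sas_code.toList) [] []
  if blocks.isEmpty then [sas_code] else blocks.map String.mk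

-- ===== PORT B =====
-- B's `_chunks`: recursion on the line list; a terminator line closes a chunk, any other line is
-- prepended to the first chunk of the recursive result.
def pvChunksB : List (List Char) → List (List Char)
  | [] => []
  | head :: rest =>
      let stripped := PySem.Chars.lower (PySem.Chars.strip head)
      if stripped = "run;".toList ∨ stripped = "quit;".toList then
        head :: pvChunksB rest
      else
        match pvChunksB rest with
        | [] => [head]
        | g :: gs => (head ++ g) :: gs

def partition_sas_blocks_py_alt (sas_code : String) : List String :=
  let blocks := ((pvChunksB (pvSplitlinesKeep sas_code.toList)).map PySem.Chars.strip).filter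
      (fun b => ¬ b.isEmpty)
  if blocks.isEmpty then [sas_code] else blocks.map String.mk

-- ===== PRECONDITION & SPEC =====
def Spec_partition_sas_blocks_py (sas_code : String) (out : List String) : Prop := out = partition_sas_blocks_py_alt sas_code
instance (sas_code : String) (out : List String) : Decidable (Spec_partition_sas_blocks_py sas_code out) := by unfold Spec_partition_sas_blocks_py; infer_instance

-- ===== CLAIM (what is proved, stated in full; the proofs are below) =====
def Claim_equal_partition_sas_blocks_py : Prop := ∀ (sas_code : String), Dom_partition_sas_blocks_py sas_code → Spec_partition_sas_blocks_py sas_code (partition_sas_blocks_py sas_code)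

-- ===== LEMMAS AND PROOFS =====

def pvIsTerm (l : List Char) : Bool :=
  decide (PySem.Chars.lower (PySem.Chars.strip l) = "run;".toList
        ∨ PySem.Chars.lower (PySem.Chars.strip l) = "quit;".toList)

-- Chunks of a list with a non-terminator prefix: the prefix merges into the first chunk.
theorem pvChunksB_prefix (cur : List (List Char)) (lines : List (List Char))
    (h : ∀ l ∈ cur, pvIsTerm l = false) :
    pvChunksB (cur ++ lines) =
      match pvChunksB lines with
      | [] => if cur = [] then [] else [cur.flatten]
      | g :: gs => (cur.flatten ++ g) :: gs := by
  induction cur with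
  | nil =>
    cases hl : pvChunksB lines with
    | nil => simp [hl]
    | cons g gs => simp [hl]
  | cons c cur ih =>
    have hc : pvIsTerm c = false := h c (List.mem_cons_self ..)
    have hrest : ∀ l ∈ cur, pvIsTerm l = false := fun l hm => h l (List.mem_cons_of_mem _ hm)
    have hc' : ¬ (PySem.Chars.lower (PySem.Chars.strip c) = "run;".toList
        ∨ PySem.Chars.lower (PySem.Chars.strip c) = "quit;".toList) := by
      simpa [pvIsTerm] using hc
    rw [List.cons_append, pvChunksB]
    simp only [hc', if_false]
    rw [ih hrest]
    cases hl : pvChunksB lines with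
    | nil =>
      by_cases hcur : cur = [] <;> simp [hcur]
    | cons g gs => simp

theorem pvLoopA_eq (lines : List (List Char)) :
    ∀ (cur blocks : List (List Char)), (∀ l ∈ cur, pvIsTerm l = false) →
    pvLoopA lines blocks cur =
      blocks ++ ((pvChunksB (cur ++ lines)).map PySem.Chars.strip).filter (fun b => ¬ b.isEmpty) := by
  induction lines with
  | nil =>
    intro cur blocks h
    have hp := pvChunksB_prefix cur [] h
    simp only [List.append_nil, pvChunksB] at hp
    rw [pvLoopA, List.append_nil, hp]
    cases hcur : cur.isEmpty
    · have : ¬ cur = [] := by simpa [List.isEmpty_iff] using hcur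
      simp only [Bool.false_eq_true, if_false, this]
      by_cases he : PySem.Chars.strip cur.flatten = [] <;>
        simp [he, List.filter, List.isEmpty_iff]
    · have : cur = [] := by simpa [List.isEmpty_iff] using hcur
      simp [this]
  | cons line rest ih =>
    intro cur blocks h
    rw [pvLoopA]
    by_cases ht : PySem.Chars.lower (PySem.Chars.strip line) = "run;".toList
        ∨ PySem.Chars.lower (PySem.Chars.strip line) = "quit;".toList
    · simp only [ht, if_true]
      rw [ih [] _ (by simp)]
      have hsplit : pvChunksB (cur ++ line :: rest) = (cur.flatten ++ line) :: pvChunksB rest := by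
        rw [pvChunksB_prefix cur (line :: rest) h]
        have hstep : pvChunksB (line :: rest) = line :: pvChunksB rest := by
          simp only [pvChunksB]
          rw [if_pos ht]
        rw [hstep]
      rw [hsplit]
      simp only [List.map_cons, List.flatten_append, List.flatten_cons, List.flatten_nil,
        List.append_nil, List.filter]
      by_cases he : (PySem.Chars.strip (cur.flatten ++ line)).isEmpty = true <;>
        simp [he, List.append_assoc]
    · simp only [ht, if_false]
      rw [ih (cur ++ [line]) blocks ?_]
      · simp [List.append_assoc]
      · intro l hm
        rcases List.mem_append.mp hm with hm | hm
        · exact h l hm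
        · simp only [List.mem_singleton] at hm
          subst hm
          simpa [pvIsTerm] using ht

-- ===== VERDICT (by name: the statement is the Claim_ definition above) =====
theorem partition_sas_blocks_py_spec : Claim_equal_partition_sas_blocks_py := by
  intro sas_code _
  unfold Spec_partition_sas_blocks_py partition_sas_blocks_py partition_sas_blocks_py_alt
  rw [pvLoopA_eq (pvSplitlinesKeep sas_code.toList) [] [] (by simp)]
  simp
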